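-- pv_equiv track=rewrite | github.com/donghyeon95/- | 6주차/박준민_풀이/로또의 최고순위와 최저순위.py | solution
-- ===== SOURCE A (Python) =====
-- def solution(lottos, win_nums):
--     answer = []
--     l_cnt =  0 #일치한 번호
--     z_cnt = lottos.count(0) #알아볼 수 없는 번호
--     rank = [6, 6, 5, 4, 3, 2, 1] # 로또 등수
--     #   0 <= l_cnt <= 6, 0 <= z_cnt <= 6
--     #   z_cnt가 6일 경우, max_rank는 rank[6], min_rank[0]을 가져와야하기 때문에
--     #   rank[0]에 6을 한번 더 집어넣음
--
--     for l in lottos: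
--             if l in win_nums:
--                     l_cnt +=1
--
--     max_rank = rank[l_cnt + z_cnt] #최고 등수
--     min_rank = rank[l_cnt]  #최저 등수
--     answer = [max_rank, min_rank]
--
--     return answer
-- ===== SOURCE B (Python) =====
-- def solution(lottos, win_nums):
--     ls = sorted(lottos)
--     ws = sorted(set(win_nums))
--     i = j = 0
--     matches = zeros = 0
--     while i < len(ls):
--         x = ls[i]
--         if j < len(ws) and ws[j] < x:
--             j += 1
--             continue
--         if j < len(ws) and ws[j] == x:
--             matches += 1
--         if x == 0:
--             zeros += 1
--         i += 1
--     return [min(7 - matches - zeros, 6), min(7 - matches, 6)]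
-- ===== Notes on version B (the rewrite author's own statement) =====
-- stated objective: alternative
-- what changed: Replaces the nested membership scan plus rank lookup table with a sort-then-two-pointer merge: lottos and the deduplicated win numbers are sorted and a single merge pass counts matches and zeros, and both ranks come from the closed form min(7-k,6).
-- outside the precondition, e.g. on solution([1, 1, 1, 1, 1, 1, 1], [1]): A raises IndexError, B returns [0, 0]
import Mathlib
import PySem

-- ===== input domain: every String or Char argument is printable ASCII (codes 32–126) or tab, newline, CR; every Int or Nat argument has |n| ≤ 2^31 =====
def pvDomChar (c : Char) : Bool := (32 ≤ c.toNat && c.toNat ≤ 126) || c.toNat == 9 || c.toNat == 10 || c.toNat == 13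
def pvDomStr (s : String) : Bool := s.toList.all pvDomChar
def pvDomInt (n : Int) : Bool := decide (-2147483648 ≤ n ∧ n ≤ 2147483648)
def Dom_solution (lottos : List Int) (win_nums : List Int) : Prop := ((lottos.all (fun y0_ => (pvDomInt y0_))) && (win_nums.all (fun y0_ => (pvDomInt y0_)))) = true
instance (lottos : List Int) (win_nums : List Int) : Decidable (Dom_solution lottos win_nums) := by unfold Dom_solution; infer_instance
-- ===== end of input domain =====

-- B replaces A's nested membership scan + rank table with sort-then-two-pointer merge counting and a closed-form rank: alternative.

-- ===== PORT A =====
def solution (lottos : List Int) (win_nums : List Int) : List Int :=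
  let z_cnt : Int := PySem.List.count lottos 0
  let rank : List Int := [6, 6, 5, 4, 3, 2, 1]
  let l_cnt : Int := lottos.foldl (fun acc l => if win_nums.contains l then acc + 1 else acc) 0
  let max_rank : Int := (PySem.List.pyGet? rank (l_cnt + z_cnt)).getD 0
  let min_rank : Int := (PySem.List.pyGet? rank l_cnt).getD 0
  [max_rank, min_rank]

-- ===== PORT B =====
-- Source B's while-loop over (i, j): consume ws head while ws[j] < x, else consume ls head,
-- counting a match when ws[j] == x and a zero when x == 0.
def mergeCount : List Int → List Int → Nat × Nat
  | [], _ => (0, 0)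
  | x :: xs, [] =>
      let r := mergeCount xs []
      (r.1, r.2 + if x = 0 then 1 else 0)
  | x :: xs, y :: ys =>
      if y < x then mergeCount (x :: xs) ys
      else
        let r := mergeCount xs (y :: ys)
        ((if y = x then r.1 + 1 else r.1), r.2 + if x = 0 then 1 else 0)
  termination_by xs ys => xs.length + ys.length

def solution_alt (lottos : List Int) (win_nums : List Int) : List Int :=
  let ls := PySem.List.sorted lottos (fun x => x) false
  let ws := PySem.List.sorted (PySem.Set.ofList win_nums) (fun x => x) false
  let r := mergeCount ls ws
  [min (7 - (r.1 : Int) - (r.2 : Int)) 6, min (7 - (r.1 : Int)) 6]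

-- ===== PRECONDITION & SPEC =====
-- Pre_ excludes inputs where (matched count) + (count of zeros) exceeds 6: there A's rank[l_cnt+z_cnt]
-- raises IndexError (a real 6-number lotto ticket always satisfies the bound).
def Pre_solution (lottos : List Int) (win_nums : List Int) : Prop :=
  (lottos.countP (fun l => win_nums.contains l) : Int) + (lottos.count 0 : Int) ≤ 6
instance (lottos : List Int) (win_nums : List Int) : Decidable (Pre_solution lottos win_nums) := by unfold Pre_solution; infer_instance

def pvWitness_solution : List Int × List Int := ([44, 1, 0, 0, 31, 25], [31, 10, 45, 1, 6, 19])

def Spec_solution (lottos : List Int) (win_nums : List Int) (out : List Int) : Prop := out = solution_alt lottos win_nums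
instance (lottos : List Int) (win_nums : List Int) (out : List Int) : Decidable (Spec_solution lottos win_nums out) := by unfold Spec_solution; infer_instance

-- ===== CLAIM (what is proved, stated in full; the proofs are below) =====
def Claim_equal_solution : Prop := ∀ (lottos : List Int) (win_nums : List Int), Dom_solution lottos win_nums → Pre_solution lottos win_nums → Spec_solution lottos win_nums (solution lottos win_nums)

-- ===== LEMMAS AND PROOFS =====

-- The merge pass over a ≤-sorted ls and a <-sorted ws counts exactly the membership matches and zeros.
theorem mergeCount_spec (xs ys : List Int) (hx : xs.Pairwise (· ≤ ·)) (hy : ys.Pairwise (· < ·)) :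
    mergeCount xs ys = (xs.countP (fun a => ys.contains a), xs.count 0) := by
  induction xs, ys using mergeCount.induct with
  | case1 ys => simp [mergeCount]
  | case2 x xs ih =>
    rw [mergeCount]
    have := ih (hx.sublist (List.sublist_cons_self x xs)) hy
    simp [this, List.countP_cons, List.count_cons, Nat.add_comm]
  | case3 x xs y ys hlt ih =>
    rw [mergeCount, if_pos hlt]
    have := ih hx (hy.sublist (List.sublist_cons_self y ys))
    rw [this]
    have hcong : (x :: xs).countP (fun a => (y :: ys).contains a)
        = (x :: xs).countP (fun a => ys.contains a) := by
      apply List.countP_congr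
      intro a ha
      have hxa : x ≤ a := by
        rcases ha with _ | h
        · exact le_refl _
        · exact (List.pairwise_cons.mp hx).1 a (by assumption)
      have hne : a ≠ y := by omega
      simp [List.contains_cons, hne]
    rw [hcong]
  | case4 x xs y ys hlt ih =>
    rw [mergeCount, if_neg hlt]
    have := ih (hx.sublist (List.sublist_cons_self x xs)) hy
    rw [this]
    by_cases hxy : y = x
    · subst hxy
      simp [List.countP_cons, List.count_cons, Nat.add_comm]
    · have hxney : ¬ x = y := by omega
      have hxnys : x ∉ ys := by
        intro hmem
        have := (List.pairwise_cons.mp hy).1 x hmem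
        omega
      simp [List.countP_cons, List.count_cons, hxy, Nat.add_comm]
      exact ⟨hxney, hxnys⟩

-- A's match-counting loop is the countP of the membership predicate.
theorem pv_foldl_count (win_nums : List Int) (lottos : List Int) (a : Int) :
    lottos.foldl (fun acc l => if win_nums.contains l then acc + 1 else acc) a
      = a + (lottos.countP (fun l => win_nums.contains l) : Nat) := by
  induction lottos generalizing a with
  | nil => simp
  | cons x xs ih =>
    simp only [List.foldl_cons, List.countP_cons, ih]
    cases h : win_nums.contains x <;> simp [h] <;> push_cast <;> omega

-- The rank table at index k ≤ 6 is the closed form min (7-k) 6.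
theorem pv_rank_lookup (k : Nat) (hk : k ≤ 6) :
    ((PySem.List.pyGet? [6, 6, 5, 4, 3, 2, 1] ((k : Nat) : Int)).getD (0 : Int))
      = min (7 - (k : Int)) 6 := by
  interval_cases k <;> decide

-- B's merge over the sorted copies counts the same matches and zeros as A's predicates on the raw lists.
theorem mergeCount_sorted (lottos win_nums : List Int) :
    mergeCount (PySem.List.sorted lottos (fun x => x) false)
               (PySem.List.sorted (PySem.Set.ofList win_nums) (fun x => x) false)
      = (lottos.countP (fun l => win_nums.contains l), lottos.count 0) := by
  have hx : (PySem.List.sorted lottos (fun x => x) false).Pairwise (· ≤ ·) :=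
    PySem.List.sorted_pairwise lottos (fun x => x)
  have hy : (PySem.List.sorted (PySem.Set.ofList win_nums) (fun x => x) false).Pairwise (· < ·) :=
    PySem.List.sorted_ofList_pairwise_lt win_nums
  rw [mergeCount_spec _ _ hx hy]
  have hperm : (PySem.List.sorted lottos (fun x => x) false).Perm lottos :=
    PySem.List.sorted_perm lottos (fun x => x) false
  have hmem : ∀ a : Int,
      ((PySem.List.sorted (PySem.Set.ofList win_nums) (fun x => x) false).contains a)
        = win_nums.contains a := by
    intro a
    by_cases h : a ∈ win_nums <;>
      simp [List.contains_eq_mem, PySem.List.mem_sorted, PySem.Set.mem_ofList, h]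
  have h1 : (PySem.List.sorted lottos (fun x => x) false).countP
        (fun a => (PySem.List.sorted (PySem.Set.ofList win_nums) (fun x => x) false).contains a)
      = lottos.countP (fun l => win_nums.contains l) := by
    rw [List.countP_congr (fun a _ => by rw [hmem a])]
    exact hperm.countP_eq _
  rw [h1, hperm.count_eq]

-- ===== VERDICT (by name: the statement is the Claim_ definition above) =====
theorem solution_spec : Claim_equal_solution := by
  intro lottos win_nums _ hpre
  unfold Spec_solution solution solution_alt
  unfold Pre_solution at hpre
  simp only [pv_foldl_count, mergeCount_sorted, PySem.List.count_eq]
  set m : Nat := lottos.countP (fun l => win_nums.contains l) with hm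
  set z : Nat := lottos.count 0 with hz
  have hmz : m + z ≤ 6 := by omega
  have h1 : ((PySem.List.pyGet? [6, 6, 5, 4, 3, 2, 1] ((0 : Int) + (m : Int) + (z : Int))).getD (0 : Int)) = min (7 - (m : Int) - (z : Int)) 6 := by
    have := pv_rank_lookup (m + z) hmz
    have hcast : (0 : Int) + (m : Int) + (z : Int) = ((m + z : Nat) : Int) := by push_cast; ring
    rw [hcast, this]; push_cast; ring_nf
  have h2 : ((PySem.List.pyGet? [6, 6, 5, 4, 3, 2, 1] ((0 : Int) + (m : Int))).getD (0 : Int)) = min (7 - (m : Int)) 6 := by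
    have := pv_rank_lookup m (by omega)
    have hcast : (0 : Int) + (m : Int) = ((m : Nat) : Int) := by push_cast; ring
    rw [hcast, this]
  rw [h1, h2]
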